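-- pv_equiv track=rewrite | github.com/leorpedroso/final-otimizacao | Julia/test_answer.py | correct_answer
-- ===== SOURCE A (Python) =====
-- def correct_answer(rm, ans):
--   edges = []
--   ks = []
--
--   if len(rm) != len(ans):
--     return False
--
--   for i in range(len(ans)):
--     if ans[i][0] == '1.0':
--       edges.append(rm[i][0])
--       edges.append(rm[i][1])
--       ks.append(rm[i][2])
--
--   if len(edges) != len(set(edges)):
--     return False
--
--   if len(ks) != len(set(ks)):
--     return False
--
--   return True
-- ===== SOURCE B (Python) =====
-- def correct_answer(rm, ans):
--   if len(rm) != len(ans):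
--     return False
--
--   sel = [row for row, a in zip(rm, ans) if a[0] == '1.0']
--   edges = sorted([e for row in sel for e in (row[0], row[1])])
--   ks = sorted([row[2] for row in sel])
--
--   return all(x != y for x, y in zip(edges, edges[1:])) and \
--          all(x != y for x, y in zip(ks, ks[1:]))
-- ===== Notes on version B (the rewrite author's own statement) =====
-- stated objective: alternative
-- what changed: Uniqueness is decided by sorting the selected edges/ks and scanning adjacent pairs for a repeat, instead of A's hash-set dedup compared by length; rows are selected by zip comprehensions instead of an index loop with appends.
import Mathlib
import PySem

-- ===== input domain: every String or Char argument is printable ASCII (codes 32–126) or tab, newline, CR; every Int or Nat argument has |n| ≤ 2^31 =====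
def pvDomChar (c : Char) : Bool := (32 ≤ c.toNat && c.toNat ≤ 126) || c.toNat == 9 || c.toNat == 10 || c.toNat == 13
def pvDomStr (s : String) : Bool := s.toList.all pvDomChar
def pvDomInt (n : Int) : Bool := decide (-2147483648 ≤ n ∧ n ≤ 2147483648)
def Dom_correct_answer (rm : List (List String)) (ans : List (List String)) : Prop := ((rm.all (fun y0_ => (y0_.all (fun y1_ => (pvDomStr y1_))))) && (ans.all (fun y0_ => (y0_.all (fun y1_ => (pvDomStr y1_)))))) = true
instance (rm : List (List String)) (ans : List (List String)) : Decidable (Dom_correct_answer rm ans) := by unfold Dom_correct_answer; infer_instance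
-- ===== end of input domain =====

-- B decides uniqueness by sorting the selected edges/ks and scanning adjacent pairs for a repeat,
-- instead of A's set-based dedup compared by length (objective: alternative).

-- ===== PORT A =====
-- the loop body of A, over the index i (rm[i]/ans[i] total under Pre_: every access in range)
def caBody (rm : List (List String)) (ans : List (List String))
    (st : List String × List String) (i : Int) : List String × List String :=
  if PySem.List.pyGetD (PySem.List.pyGetD ans i []) 0 "" = "1.0" then
    (st.1 ++ [PySem.List.pyGetD (PySem.List.pyGetD rm i []) 0 ""]
          ++ [PySem.List.pyGetD (PySem.List.pyGetD rm i []) 1 ""],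
     st.2 ++ [PySem.List.pyGetD (PySem.List.pyGetD rm i []) 2 ""])
  else st

def correct_answer (rm : List (List String)) (ans : List (List String)) : Bool :=
  if rm.length ≠ ans.length then false
  else
    let st := (PySem.List.pyRange 0 (ans.length : Int) 1).foldl (caBody rm ans) ([], [])
    if st.1.length ≠ (PySem.Set.ofList st.1).length then false
    else if st.2.length ≠ (PySem.Set.ofList st.2).length then false
    else true

-- ===== PORT B =====
def correct_answer_alt (rm : List (List String)) (ans : List (List String)) : Bool :=
  if rm.length ≠ ans.length then false
  else
    let sel := ((rm.zip ans).filter (fun p => PySem.List.pyGetD p.2 0 "" == "1.0")).map Prod.fst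
    let edges := PySem.List.sorted
      (sel.flatMap (fun r => [PySem.List.pyGetD r 0 "", PySem.List.pyGetD r 1 ""])) (fun x => x) false
    let ks := PySem.List.sorted (sel.map (fun r => PySem.List.pyGetD r 2 "")) (fun x => x) false
    ((edges.zip edges.tail).all (fun p => p.1 != p.2)) &&
      ((ks.zip ks.tail).all (fun p => p.1 != p.2))

-- ===== PRECONDITION & SPEC =====
-- Pre_ excludes exactly the inputs on which A raises IndexError: when the lengths match, every
-- ans row must be nonempty (ans[i][0]) and every selected rm row must have at least 3 entries.
def Pre_correct_answer (rm : List (List String)) (ans : List (List String)) : Prop :=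
  rm.length = ans.length →
    ∀ p ∈ rm.zip ans, p.2 ≠ [] ∧ (p.2.headD "" = "1.0" → 3 ≤ p.1.length)
instance (rm : List (List String)) (ans : List (List String)) : Decidable (Pre_correct_answer rm ans) := by unfold Pre_correct_answer; infer_instance

def pvWitness_correct_answer : List (List String) × List (List String) :=
  ([["a", "b", "1"], ["c", "d", "2"]], [["1.0"], ["0.0"]])

def Spec_correct_answer (rm : List (List String)) (ans : List (List String)) (out : Bool) : Prop := out = correct_answer_alt rm ans
instance (rm : List (List String)) (ans : List (List String)) (out : Bool) : Decidable (Spec_correct_answer rm ans out) := by unfold Spec_correct_answer; infer_instance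

-- ===== CLAIM (what is proved, stated in full; the proofs are below) =====
def Claim_equal_correct_answer : Prop := ∀ (rm : List (List String)) (ans : List (List String)), Dom_correct_answer rm ans → Pre_correct_answer rm ans → Spec_correct_answer rm ans (correct_answer rm ans)

-- ===== LEMMAS AND PROOFS =====

-- the selected edges / ks of a zipped row list (A accumulates them; B sorts them)
def selEdges : List (List String × List String) → List String
  | [] => []
  | (r, a) :: t =>
      if PySem.List.pyGetD a 0 "" = "1.0" then
        PySem.List.pyGetD r 0 "" :: PySem.List.pyGetD r 1 "" :: selEdges t
      else selEdges t

def selKs : List (List String × List String) → List String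
  | [] => []
  | (r, a) :: t =>
      if PySem.List.pyGetD a 0 "" = "1.0" then
        PySem.List.pyGetD r 2 "" :: selKs t
      else selKs t

lemma ofList_sublist {α : Type} [BEq α] [LawfulBEq α] (xs : List α) :
    (PySem.Set.ofList xs).Sublist xs := by
  induction xs with
  | nil => simp [PySem.Set.ofList_nil]
  | cons x xs ih =>
    rw [PySem.Set.ofList_cons]
    have hd : (PySem.Set.discard (PySem.Set.ofList xs) x).Sublist (PySem.Set.ofList xs) := by
      unfold PySem.Set.discard; exact List.filter_sublist
    exact List.Sublist.cons₂ x (hd.trans ih)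

lemma len_ofList_eq_iff {α : Type} [BEq α] [LawfulBEq α] (xs : List α) :
    (PySem.Set.ofList xs).length = xs.length ↔ xs.Nodup := by
  constructor
  · intro h
    have he := (ofList_sublist xs).eq_of_length h
    rw [← he]; exact PySem.Set.nodup_ofList xs
  · intro h; rw [PySem.Set.ofList_eq_self_of_nodup xs h]

def pairBody (st : List String × List String) (p : List String × List String) :
    List String × List String :=
  if PySem.List.pyGetD p.2 0 "" = "1.0" then
    (st.1 ++ [PySem.List.pyGetD p.1 0 ""] ++ [PySem.List.pyGetD p.1 1 ""],
     st.2 ++ [PySem.List.pyGetD p.1 2 ""])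
  else st

lemma foldl_pairBody (zs : List (List String × List String)) (init : List String × List String) :
    zs.foldl pairBody init = (init.1 ++ selEdges zs, init.2 ++ selKs zs) := by
  induction zs generalizing init with
  | nil => simp [selEdges, selKs]
  | cons p t ih =>
    obtain ⟨r, a⟩ := p
    by_cases hf : PySem.List.pyGetD a 0 "" = "1.0" <;>
      simp [List.foldl_cons, pairBody, hf, selEdges, selKs, ih]

lemma caFold_eq (rm ans : List (List String)) (h : rm.length = ans.length)
    (init : List String × List String) :
    (PySem.List.pyRange 0 (ans.length : Int) 1).foldl (caBody rm ans) init =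
      (init.1 ++ selEdges (rm.zip ans), init.2 ++ selKs (rm.zip ans)) := by
  have hz : (rm.zip ans).length = ans.length := by simp [List.length_zip, h]
  have step1 : (PySem.List.pyRange 0 (ans.length : Int) 1).foldl (caBody rm ans) init =
      (PySem.List.pyRange 0 (((rm.zip ans).length : Nat) : Int) 1).foldl
        (fun st i => pairBody st (PySem.List.pyGetD (rm.zip ans) i ([], []))) init := by
    rw [hz]
    apply PySem.List.foldl_congr_mem
    intro st i hi
    have hmem := (PySem.List.mem_pyRange_one).mp hi
    have h0 : 0 ≤ i := by omega
    have h1 : i < (ans.length : Int) := by omega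
    have h1' : i < ((rm.zip ans).length : Int) := by rw [hz]; exact h1
    have h1'' : i < (rm.length : Int) := by omega
    rw [PySem.List.pyGetD_eq_getElem (rm.zip ans) ([], []) h0 h1']
    rw [List.getElem_zip]
    simp only [caBody, pairBody]
    rw [PySem.List.pyGetD_eq_getElem ans [] h0 h1,
        PySem.List.pyGetD_eq_getElem rm [] h0 h1'']
  rw [step1, PySem.List.foldl_pyRange_zero_pyGetD' (rm.zip ans) ([], []) pairBody init, foldl_pairBody]

-- B's comprehensions compute exactly the selected edges / ks
lemma bEdges_eq (zs : List (List String × List String)) :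
    ((zs.filter (fun p => PySem.List.pyGetD p.2 0 "" == "1.0")).map Prod.fst).flatMap
      (fun r => [PySem.List.pyGetD r 0 "", PySem.List.pyGetD r 1 ""]) = selEdges zs := by
  induction zs with
  | nil => simp [selEdges]
  | cons p t ih =>
    obtain ⟨r, a⟩ := p
    by_cases hf : PySem.List.pyGetD a 0 "" = "1.0" <;>
      simp [hf, selEdges, ih]

lemma bKs_eq (zs : List (List String × List String)) :
    ((zs.filter (fun p => PySem.List.pyGetD p.2 0 "" == "1.0")).map Prod.fst).map
      (fun r => PySem.List.pyGetD r 2 "") = selKs zs := by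
  induction zs with
  | nil => simp [selKs]
  | cons p t ih =>
    obtain ⟨r, a⟩ := p
    by_cases hf : PySem.List.pyGetD a 0 "" = "1.0" <;>
      simp [hf, selKs, ih]

-- on a ≤-sorted list, "no adjacent pair is equal" is exactly Nodup
lemma allNe_iff_nodup : ∀ (xs : List String), xs.Pairwise (· ≤ ·) →
    (((xs.zip xs.tail).all (fun p => p.1 != p.2)) = true ↔ xs.Nodup)
  | [], _ => by simp
  | [a], _ => by simp
  | a :: b :: t, hp => by
    have hab : a ≤ b := (List.pairwise_cons.mp hp).1 b (List.mem_cons_self)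
    have hat : ∀ x ∈ t, a ≤ x := fun x hx =>
      (List.pairwise_cons.mp hp).1 x (List.mem_cons_of_mem b hx)
    have hbt : ∀ x ∈ t, b ≤ x := fun x hx =>
      (List.pairwise_cons.mp ((List.pairwise_cons.mp hp).2)).1 x hx
    have ih := allNe_iff_nodup (b :: t) (List.pairwise_cons.mp hp).2
    simp only [List.tail_cons, List.zip_cons_cons, List.all_cons, Bool.and_eq_true,
      bne_iff_ne, ne_eq] at ih ⊢
    rw [ih, List.nodup_cons (l := b :: t)]
    constructor
    · rintro ⟨hne, hnd⟩
      refine ⟨?_, hnd⟩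
      intro hmem
      rcases List.mem_cons.mp hmem with h | h
      · exact hne h
      · exact hne (le_antisymm hab (le_trans (hbt a h) (le_of_eq rfl)))
    · rintro ⟨hnm, hnd⟩
      exact ⟨fun h => hnm (List.mem_cons.mpr (Or.inl h)), hnd⟩

-- ===== VERDICT (by name: the statement is the Claim_ definition above) =====
theorem correct_answer_spec : Claim_equal_correct_answer := by
  intro rm ans _ _
  unfold Spec_correct_answer correct_answer correct_answer_alt
  by_cases h : rm.length = ans.length
  · have hh : ¬(rm.length ≠ ans.length) := by omega
    simp only [if_neg hh]
    have hA : (PySem.List.pyRange 0 (ans.length : Int) 1).foldl (caBody rm ans) ([], []) =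
        (selEdges (rm.zip ans), selKs (rm.zip ans)) := by
      simpa using caFold_eq rm ans h ([], [])
    simp only [hA, bEdges_eq, bKs_eq]
    set E := selEdges (rm.zip ans) with hE'
    set K := selKs (rm.zip ans) with hK'
    set sE := PySem.List.sorted E (fun x => x) false with hsE
    set sK := PySem.List.sorted K (fun x => x) false with hsK
    have hBE : ((sE.zip sE.tail).all (fun p => p.1 != p.2) = true) ↔ E.Nodup := by
      rw [allNe_iff_nodup sE (by simpa using PySem.List.sorted_pairwise E (fun x => x))]
      exact (PySem.List.sorted_perm E (fun x => x) false).nodup_iff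
    have hBK : ((sK.zip sK.tail).all (fun p => p.1 != p.2) = true) ↔ K.Nodup := by
      rw [allNe_iff_nodup sK (by simpa using PySem.List.sorted_pairwise K (fun x => x))]
      exact (PySem.List.sorted_perm K (fun x => x) false).nodup_iff
    by_cases hE : E.Nodup
    · rw [if_neg (by simp [(len_ofList_eq_iff E).mpr hE])]
      rw [hBE.mpr hE]
      by_cases hK : K.Nodup
      · rw [if_neg (by simp [(len_ofList_eq_iff K).mpr hK])]
        rw [hBK.mpr hK]
        rfl
      · rw [if_pos (fun hc => hK ((len_ofList_eq_iff K).mp hc.symm))]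
        rw [Bool.eq_false_iff.mpr (fun hc => hK (hBK.mp hc))]
        simp
    · rw [if_pos (fun hc => hE ((len_ofList_eq_iff E).mp hc.symm))]
      rw [Bool.eq_false_iff.mpr (fun hc => hE (hBE.mp hc))]
      simp
  · rw [if_pos h, if_pos h]
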